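-- pv_equiv track=rewrite | github.com/HyeonSeonChoi/FashionNavi | o_selectRecomandImage.py | selectImage
-- ===== SOURCE A (Python) =====
-- def selectImage(upper_path, lower_path, upper_color_path, lower_color_path):
--     rec_color = list()
--     rec_seg = list()
--     rec_image_path = list()
--
--     #색 비교
--     for i in lower_color_path:
--         for j in upper_color_path:
--             if i == j:
--                 rec_color.append(i)
--                 break
--
--     #옷 형태 비교
--     for k in lower_path:
--         for t in upper_path:
--             if k == t:
--                 rec_seg.append(k)
--                 break
--
--     #추천할 이미지 path 선택
--     for x in rec_color:
--         for y in rec_seg: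
--             if x == y:
--                 rec_image_path.append(x)
--                 break
--
--     return rec_image_path
-- ===== SOURCE B (Python) =====
-- def selectImage(upper_path, lower_path, upper_color_path, lower_color_path):
--     uc = set(upper_color_path)
--     up = set(upper_path)
--     lp = set(lower_path)
--     return [i for i in lower_color_path if i in uc and i in lp and i in up]
-- ===== Notes on version B (the rewrite author's own statement) =====
-- stated objective: faster
-- what changed: Replaced A's three nested double-loop passes (quadratic scans building rec_color and rec_seg and then intersecting them) by three hash sets built once and a single filtering pass over lower_color_path.
import Mathlib
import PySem

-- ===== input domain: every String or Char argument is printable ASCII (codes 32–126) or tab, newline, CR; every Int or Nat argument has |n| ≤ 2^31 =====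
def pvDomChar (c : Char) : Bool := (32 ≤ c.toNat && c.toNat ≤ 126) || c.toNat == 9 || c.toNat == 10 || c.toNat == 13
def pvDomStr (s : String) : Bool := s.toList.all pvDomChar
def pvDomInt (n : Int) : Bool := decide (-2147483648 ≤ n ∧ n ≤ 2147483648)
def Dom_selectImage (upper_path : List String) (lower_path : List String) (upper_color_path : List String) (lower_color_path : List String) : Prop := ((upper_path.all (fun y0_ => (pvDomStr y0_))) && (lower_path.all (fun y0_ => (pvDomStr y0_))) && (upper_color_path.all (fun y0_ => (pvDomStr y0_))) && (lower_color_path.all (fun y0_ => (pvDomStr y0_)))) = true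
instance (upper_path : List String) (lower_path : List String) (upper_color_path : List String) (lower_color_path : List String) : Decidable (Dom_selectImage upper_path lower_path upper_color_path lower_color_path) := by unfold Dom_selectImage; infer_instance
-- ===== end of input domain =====

-- B fuses A's three nested double-loop passes into three membership sets and one filtering pass over lower_color_path (objective: faster, O(n) vs O(n^2)-style nested scans).

-- ===== PORT A =====
-- inner 'for j in ys: if i == j: append; break' — true iff some element equals i (first hit stops the scan)
def pvFirstHit (i : String) : List String → Bool
  | [] => false
  | j :: rest => if i == j then true else pvFirstHit i rest

def selectImage (upper_path : List String) (lower_path : List String) (upper_color_path : List String) (lower_color_path : List String) : List String :=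
  let rec_color := lower_color_path.foldl (fun acc i => if pvFirstHit i upper_color_path then acc ++ [i] else acc) []
  let rec_seg := lower_path.foldl (fun acc k => if pvFirstHit k upper_path then acc ++ [k] else acc) []
  let rec_image_path := rec_color.foldl (fun acc x => if pvFirstHit x rec_seg then acc ++ [x] else acc) []
  rec_image_path

-- ===== PORT B =====
def selectImage_alt (upper_path : List String) (lower_path : List String) (upper_color_path : List String) (lower_color_path : List String) : List String :=
  let uc := PySem.Set.ofList upper_color_path
  let up := PySem.Set.ofList upper_path
  let lp := PySem.Set.ofList lower_path
  lower_color_path.filter (fun i => PySem.Set.contains uc i && PySem.Set.contains lp i && PySem.Set.contains up i)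

-- ===== PRECONDITION & SPEC =====
def Spec_selectImage (upper_path : List String) (lower_path : List String) (upper_color_path : List String) (lower_color_path : List String) (out : List String) : Prop := out = selectImage_alt upper_path lower_path upper_color_path lower_color_path
instance (upper_path : List String) (lower_path : List String) (upper_color_path : List String) (lower_color_path : List String) (out : List String) : Decidable (Spec_selectImage upper_path lower_path upper_color_path lower_color_path out) := by unfold Spec_selectImage; infer_instance

-- ===== CLAIM (what is proved, stated in full; the proofs are below) =====
def Claim_equal_selectImage : Prop := ∀ (upper_path : List String) (lower_path : List String) (upper_color_path : List String) (lower_color_path : List String), Dom_selectImage upper_path lower_path upper_color_path lower_color_path → Spec_selectImage upper_path lower_path upper_color_path lower_color_path (selectImage upper_path lower_path upper_color_path lower_color_path)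

-- ===== LEMMAS AND PROOFS =====

theorem pvFirstHit_eq_contains (i : String) (xs : List String) : pvFirstHit i xs = xs.contains i := by
  induction xs with
  | nil => rfl
  | cons j rest ih =>
      simp [pvFirstHit, ih]

theorem set_contains_eq (xs : List String) (x : String) :
    PySem.Set.contains (PySem.Set.ofList xs) x = xs.contains x := by
  simp [PySem.Set.contains, PySem.Set.mem_ofList]

theorem contains_filter' (p : String → Bool) (l : List String) (x : String) :
    (l.filter p).contains x = (l.contains x && p x) := by
  simp [List.mem_filter, Bool.and_comm]

-- ===== VERDICT (by name: the statement is the Claim_ definition above) =====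
theorem selectImage_spec : Claim_equal_selectImage := by
  intro up lp ucp lcp _
  unfold Spec_selectImage selectImage selectImage_alt
  simp only [PySem.List.foldl_append_if_eq_filter, List.nil_append,
    pvFirstHit_eq_contains, set_contains_eq, List.filter_filter]
  refine List.filter_congr ?_
  intro x _
  simp only [contains_filter']
  simp [Bool.and_comm, Bool.and_left_comm, Bool.and_assoc]
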